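-- pv_equiv track=rewrite | github.com/RainbowDragon/ACSL | Python/Contest 1/2020 - 2021/NumeralTrianglesSenior.py | sum_of_last_row
-- ===== SOURCE A (Python) =====
-- def sum_of_last_row(s, d, r):
--
--     result = 0
--     numbers_to_skip = r * (r - 1) // 2
--
--     start_number = int(s, 16)
--     delta = int(d, 16)
--     current_number = start_number + delta * numbers_to_skip
--
--     for k in range(r):
--         result += transform_to_single_hex_digit(current_number)
--         current_number += delta
--
--     result = transform_to_single_hex_digit(result)
--     hex_digits = ["0", "1", "2", "3", "4", "5", "6", "7", "8", "9", "A", "B", "C", "D", "E", "F"]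
--
--     return hex_digits[result]
--
-- def transform_to_single_hex_digit(number):
--
--     while number > 15:
--         digit_sum = 0
--
--         while number > 0:
--             digit_sum += number % 16
--             number //= 16
--
--         number = digit_sum
--
--     return number
-- ===== SOURCE B (Python) =====
-- def sum_of_last_row(s, d, r):
--     # O(1): base-16 digital roots depend only on the value mod 15 (16 = 15 + 1),
--     # so the r-term sum is q full 15-term cycles plus a partial cycle.
--     hex_digits = "0123456789ABCDEF"
--     start = int(s, 16)
--     delta = int(d, 16)
--     if r <= 0:
--         return hex_digits[0]
--     first = start + delta * (r * (r - 1) // 2)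
--     cycle = [15 if (first + k * delta) % 15 == 0 else (first + k * delta) % 15
--              for k in range(15)]
--     q, rem = r // 15, r % 15
--     total = q * sum(cycle) + sum(cycle[:rem])
--     if first == 0:
--         # the k = 0 term is the number 0, whose digital root is 0, not 15
--         total = 0 if delta == 0 else total - 15
--     return hex_digits[0 if total == 0 else 1 + (total - 1) % 15]
-- ===== Notes on version B (the rewrite author's own statement) =====
-- stated objective: faster
-- what changed: B replaces A's r-iteration loop of repeated hex-digit-summing by a closed form: base-16 digital roots depend only on the value mod 15, so the r-term sum is (r//15) copies of a fixed 15-term cycle plus a partial cycle, with a one-off correction for a 0 term.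
-- outside the precondition, e.g. on sum_of_last_row('-1', '0', 2): A returns 'E', B returns 'D'; on sum_of_last_row('-20', '1', 1): A raises IndexError, B returns 'D'
import Mathlib
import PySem

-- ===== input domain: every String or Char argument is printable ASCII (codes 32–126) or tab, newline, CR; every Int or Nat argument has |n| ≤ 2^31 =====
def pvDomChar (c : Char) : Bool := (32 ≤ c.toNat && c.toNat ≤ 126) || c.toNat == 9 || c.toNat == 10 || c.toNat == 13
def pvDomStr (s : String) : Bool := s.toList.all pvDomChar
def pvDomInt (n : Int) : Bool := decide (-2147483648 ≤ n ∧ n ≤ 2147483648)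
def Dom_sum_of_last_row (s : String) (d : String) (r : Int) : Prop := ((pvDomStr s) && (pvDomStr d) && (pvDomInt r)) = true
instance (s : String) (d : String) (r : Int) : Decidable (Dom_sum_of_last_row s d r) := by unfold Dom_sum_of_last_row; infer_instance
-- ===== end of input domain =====

-- B replaces A's O(r) loop of repeated hex-digit-summing by an O(1) closed form:
-- base-16 digital roots depend only on the value mod 15, so the r-term sum is
-- q full 15-term cycles plus a partial cycle.  Equivalence is claimed on inputs
-- whose hex strings parse to nonnegative values (Pre_ below).

-- ===== PORT A =====
-- inner 'while number > 0' loop of transform_to_single_hex_digit; the fuel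
-- argument only makes the loop total: number.toNat ticks always suffice
-- (number strictly decreases while positive), proved in pvGoExact below
def pvHexDigitSumGo : Nat → Int → Int → Int
  | 0, _, acc => acc
  | fuel + 1, number, acc =>
    if 0 < number then
      pvHexDigitSumGo fuel (PySem.Int.floordiv number 16) (acc + PySem.Int.mod number 16)
    else acc

def pvDigitSum (number : Int) : Int := pvHexDigitSumGo number.toNat number 0

-- outer 'while number > 15' loop; again number.toNat ticks of fuel suffice
-- because the digit sum of a number > 15 is strictly smaller (pvDigitSum_lt)
def pvTransformGo : Nat → Int → Int
  | 0, n => n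
  | fuel + 1, n => if 15 < n then pvTransformGo fuel (pvDigitSum n) else n

def pvTransform (number : Int) : Int := pvTransformGo number.toNat number

def sum_of_last_row (s : String) (d : String) (r : Int) : String :=
  match PySem.Int.ofStrBase? s 16, PySem.Int.ofStrBase? d 16 with
  | some start_number, some delta =>
    let numbers_to_skip := PySem.Int.floordiv (r * (r - 1)) 2
    let current_number := start_number + delta * numbers_to_skip
    let st := (PySem.List.pyRange 0 r 1).foldl
      (fun (p : Int × Int) (_ : Int) => (p.1 + pvTransform p.2, p.2 + delta))
      (0, current_number)
    let result := pvTransform st.1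
    let hex_digits : List String :=
      ["0","1","2","3","4","5","6","7","8","9","A","B","C","D","E","F"]
    PySem.List.pyGetD hex_digits result ""
  | _, _ => ""    -- int(_, 16) raised ValueError: outside Pre_

-- ===== PORT B =====
-- s[i] in Python: the one-character string (none = IndexError, outside Pre_)
def pyStrIdx (s : String) (i : Int) : String :=
  match PySem.Str.pyGet? s i with
  | some c => String.ofList [c]
  | none => ""

def sum_of_last_row_alt (s : String) (d : String) (r : Int) : String :=
  match PySem.Int.ofStrBase? s 16 with
  | none => ""    -- int(s, 16) raised ValueError: outside Pre_
  | some start =>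
  match PySem.Int.ofStrBase? d 16 with
  | none => ""    -- int(d, 16) raised ValueError: outside Pre_
  | some delta =>
    let hex_digits := "0123456789ABCDEF"
    if r ≤ 0 then pyStrIdx hex_digits 0
    else
      let first := start + delta * (PySem.Int.floordiv (r * (r - 1)) 2)
      let cycle := (PySem.List.pyRange 0 15 1).map
        (fun k => if PySem.Int.mod (first + k * delta) 15 = 0 then (15 : Int)
                  else PySem.Int.mod (first + k * delta) 15)
      let q := PySem.Int.floordiv r 15
      let rem := PySem.Int.mod r 15
      let total := q * cycle.sum + (PySem.List.slice cycle none (some rem)).sum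
      let total2 := if first = 0 then (if delta = 0 then 0 else total - 15) else total
      pyStrIdx hex_digits (if total2 = 0 then 0 else 1 + PySem.Int.mod (total2 - 1) 15)

-- ===== PRECONDITION & SPEC =====
-- Pre_ excludes (a) strings that int(_, 16) rejects — there A raises ValueError —
-- and (b) hex strings with negative value: there A's value comes from Python's
-- negative-index wraparound into hex_digits (or an IndexError), an accident of
-- the implementation outside the problem's natural domain of nonnegative numbers.
def Pre_sum_of_last_row (s : String) (d : String) (r : Int) : Prop :=
  (PySem.Int.ofStrBase? s 16).isSome ∧ (PySem.Int.ofStrBase? d 16).isSome ∧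
  0 ≤ (PySem.Int.ofStrBase? s 16).getD 0 ∧ 0 ≤ (PySem.Int.ofStrBase? d 16).getD 0
instance (s : String) (d : String) (r : Int) : Decidable (Pre_sum_of_last_row s d r) := by
  unfold Pre_sum_of_last_row; infer_instance

def pvWitness_sum_of_last_row : String × String × Int := ("A", "2", 5)

def Spec_sum_of_last_row (s : String) (d : String) (r : Int) (out : String) : Prop := out = sum_of_last_row_alt s d r
instance (s : String) (d : String) (r : Int) (out : String) : Decidable (Spec_sum_of_last_row s d r out) := by unfold Spec_sum_of_last_row; infer_instance

-- ===== CLAIM (what is proved, stated in full; the proofs are below) =====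
def Claim_equal_sum_of_last_row : Prop := ∀ (s : String) (d : String) (r : Int), Dom_sum_of_last_row s d r → Pre_sum_of_last_row s d r → Spec_sum_of_last_row s d r (sum_of_last_row s d r)

-- ===== LEMMAS AND PROOFS =====

-- base-16 digital root of n ≥ 0 in closed form
def pvDrF (n : Int) : Int := if n = 0 then 0 else 1 + (n - 1) % 15
-- the residue form used by B's cycle (agrees with pvDrF for n > 0)
def pvHF (n : Int) : Int := if n % 15 = 0 then 15 else n % 15
-- sum of A's transforms over m terms of the arithmetic sequence starting at c
def pvSumT (δ : Int) : Nat → Int → Int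
  | 0, _ => 0
  | Nat.succ m, c => pvTransform c + pvSumT δ m (c + δ)
-- sum of the residue forms over m terms
def pvSumH (δ : Int) : Nat → Int → Int
  | 0, _ => 0
  | Nat.succ m, c => pvHF c + pvSumH δ m (c + δ)

theorem pvGo_le (fuel : Nat) : ∀ number acc : Int, 0 ≤ number → number.toNat ≤ fuel →
    pvHexDigitSumGo fuel number acc ≤ acc + number := by
  induction fuel with
  | zero => intro n acc h0 hf
            have : n = 0 := by omega
            subst this; simp [pvHexDigitSumGo]
  | succ fuel ih =>
    intro n acc h0 hf
    show (if 0 < n then pvHexDigitSumGo fuel (PySem.Int.floordiv n 16) (acc + PySem.Int.mod n 16) else acc) ≤ acc + n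
    split_ifs with hpos
    · rw [PySem.Int.floordiv_eq_ediv_of_pos (by omega : (0:Int) < 16),
          PySem.Int.mod_eq_emod_of_pos (by omega : (0:Int) < 16)]
      have := ih (n / 16) (acc + n % 16) (by omega) (by omega)
      omega
    · omega

theorem pvGo_pos (fuel : Nat) : ∀ number acc : Int, 0 < number → number.toNat ≤ fuel →
    acc < pvHexDigitSumGo fuel number acc := by
  induction fuel with
  | zero => intro n acc h0 hf; omega
  | succ fuel ih =>
    intro n acc h0 hf
    show acc < (if 0 < n then pvHexDigitSumGo fuel (PySem.Int.floordiv n 16) (acc + PySem.Int.mod n 16) else acc)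
    rw [if_pos h0, PySem.Int.floordiv_eq_ediv_of_pos (by omega : (0:Int) < 16),
        PySem.Int.mod_eq_emod_of_pos (by omega : (0:Int) < 16)]
    by_cases hq : 0 < n / 16
    · have := ih (n / 16) (acc + n % 16) hq (by omega)
      omega
    · have h16 : n / 16 = 0 := by omega
      rw [h16]
      have : (0:Int).toNat ≤ fuel := by omega
      rcases fuel with _ | fuel <;> simp [pvHexDigitSumGo] <;> omega

theorem pvGo_mod (fuel : Nat) : ∀ number acc : Int, 0 ≤ number → number.toNat ≤ fuel →
    pvHexDigitSumGo fuel number acc % 15 = (acc + number) % 15 := by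
  induction fuel with
  | zero => intro n acc h0 hf
            have : n = 0 := by omega
            subst this; simp [pvHexDigitSumGo]
  | succ fuel ih =>
    intro n acc h0 hf
    show (if 0 < n then pvHexDigitSumGo fuel (PySem.Int.floordiv n 16) (acc + PySem.Int.mod n 16) else acc) % 15 = (acc + n) % 15
    split_ifs with hpos
    · rw [PySem.Int.floordiv_eq_ediv_of_pos (by omega : (0:Int) < 16),
          PySem.Int.mod_eq_emod_of_pos (by omega : (0:Int) < 16)]
      have := ih (n / 16) (acc + n % 16) (by omega) (by omega)
      omega
    · omega

theorem pvDigitSum_lt (n : Int) (h : 15 < n) : pvDigitSum n < n := by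
  unfold pvDigitSum
  obtain ⟨k, hk⟩ : ∃ k, n.toNat = k + 1 := ⟨n.toNat - 1, by omega⟩
  rw [hk]
  show (if 0 < n then pvHexDigitSumGo k (PySem.Int.floordiv n 16) (0 + PySem.Int.mod n 16) else 0) < n
  rw [if_pos (by omega), PySem.Int.floordiv_eq_ediv_of_pos (by omega : (0:Int) < 16),
      PySem.Int.mod_eq_emod_of_pos (by omega : (0:Int) < 16)]
  have := pvGo_le k (n / 16) (0 + n % 16) (by omega) (by omega)
  omega

theorem pvTransformGo_eq (fuel : Nat) : ∀ n : Int, 0 ≤ n → n.toNat ≤ fuel →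
    pvTransformGo fuel n = pvDrF n := by
  induction fuel with
  | zero => intro n h0 hf
            have : n = 0 := by omega
            subst this; simp [pvTransformGo, pvDrF]
  | succ fuel ih =>
    intro n h0 hf
    show (if 15 < n then pvTransformGo fuel (pvDigitSum n) else n) = pvDrF n
    split_ifs with hgt
    · have hlt := pvDigitSum_lt n hgt
      have hpos : 0 < pvDigitSum n := pvGo_pos n.toNat n 0 (by omega) le_rfl
      have hmod : pvDigitSum n % 15 = n % 15 := by
        have := pvGo_mod n.toNat n 0 (by omega) le_rfl
        unfold pvDigitSum
        omega
      rw [ih (pvDigitSum n) (by omega) (by omega)]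
      unfold pvDrF
      rw [if_neg (by omega), if_neg (by omega)]
      omega
    · unfold pvDrF
      split_ifs <;> omega

theorem pvTransform_eq (n : Int) (h : 0 ≤ n) : pvTransform n = pvDrF n :=
  pvTransformGo_eq n.toNat n h le_rfl

theorem pvDrF_eq_pvHF (n : Int) (h : 0 < n) : pvDrF n = pvHF n := by
  unfold pvDrF pvHF
  split_ifs <;> omega

theorem pvDrF_bounds (n : Int) (h : 0 ≤ n) : 0 ≤ pvDrF n ∧ pvDrF n ≤ 15 := by
  unfold pvDrF; split_ifs <;> omega

theorem pvSumT_eq_pvSumH (δ : Int) (hδ : 0 ≤ δ) (m : Nat) :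
    ∀ c : Int, 0 < c → pvSumT δ m c = pvSumH δ m c := by
  induction m with
  | zero => intro c _; rfl
  | succ m ih =>
    intro c hc
    show pvTransform c + pvSumT δ m (c + δ) = pvHF c + pvSumH δ m (c + δ)
    rw [pvTransform_eq c (by omega), pvDrF_eq_pvHF c hc, ih (c + δ) (by omega)]

theorem pvSumT_zero_zero (m : Nat) : pvSumT 0 m 0 = 0 := by
  induction m with
  | zero => rfl
  | succ m ih =>
    show pvTransform 0 + pvSumT 0 m (0 + 0) = 0
    rw [pvTransform_eq 0 le_rfl]
    simpa [pvDrF] using ih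

theorem pvSumT_zero_pos (δ : Int) (hδ : 0 < δ) (m : Nat) :
    pvSumT δ (m + 1) 0 = pvSumH δ (m + 1) 0 - 15 := by
  show pvTransform 0 + pvSumT δ m (0 + δ) = pvHF 0 + pvSumH δ m (0 + δ) - 15
  rw [pvTransform_eq 0 le_rfl, pvSumT_eq_pvSumH δ (by omega) m (0 + δ) (by omega)]
  simp [pvDrF, pvHF]

theorem pvHF_congr (a b : Int) (h : a % 15 = b % 15) : pvHF a = pvHF b := by
  unfold pvHF; rw [h]

theorem pvSumH_shift (δ e : Int) (he : (15:Int) ∣ e) (m : Nat) :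
    ∀ c : Int, pvSumH δ m (c + e) = pvSumH δ m c := by
  induction m with
  | zero => intro c; rfl
  | succ m ih =>
    intro c
    show pvHF (c + e) + pvSumH δ m (c + e + δ) = pvHF c + pvSumH δ m (c + δ)
    rw [pvHF_congr (c + e) c (by omega), show c + e + δ = (c + δ) + e by ring, ih (c + δ)]

theorem pvSumH_split (δ : Int) (a b : Nat) :
    ∀ c : Int, pvSumH δ (a + b) c = pvSumH δ a c + pvSumH δ b (c + (a : Int) * δ) := by
  induction a with
  | zero => intro c; norm_num [pvSumH]
  | succ a ih =>
    intro c
    rw [show a + 1 + b = (a + b) + 1 by omega]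
    show pvHF c + pvSumH δ (a + b) (c + δ) = pvSumH δ (a + 1) c + pvSumH δ b (c + ((a:Int) + 1) * δ)
    rw [ih (c + δ)]
    show pvHF c + (pvSumH δ a (c + δ) + pvSumH δ b (c + δ + (a:Int) * δ)) =
        pvHF c + pvSumH δ a (c + δ) + pvSumH δ b (c + ((a:Int) + 1) * δ)
    rw [show c + δ + (a:Int) * δ = c + ((a:Int) + 1) * δ by ring]
    ring

theorem pvSumH_cycles (δ : Int) (q rem : Nat) (c : Int) :
    pvSumH δ (q * 15 + rem) c = (q : Int) * pvSumH δ 15 c + pvSumH δ rem c := by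
  induction q with
  | zero => norm_num [pvSumH]
  | succ q ih =>
    rw [show (q + 1) * 15 + rem = 15 + (q * 15 + rem) by ring]
    rw [pvSumH_split δ 15 (q * 15 + rem) c]
    rw [show c + (15:Nat) * δ = c + 15 * δ by norm_num]
    rw [pvSumH_shift δ (15 * δ) ⟨δ, rfl⟩ (q * 15 + rem) c, ih]
    push_cast
    ring

theorem pvSumH_eq_map (δ : Int) (m : Nat) :
    ∀ c : Int, pvSumH δ m c = ((List.range m).map (fun (k : Nat) => pvHF (c + (k : Int) * δ))).sum := by
  induction m with
  | zero => intro c; rfl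
  | succ m ih =>
    intro c
    show pvHF c + pvSumH δ m (c + δ) = ((List.range (m + 1)).map (fun (k : Nat) => pvHF (c + (k : Int) * δ))).sum
    rw [List.range_succ_eq_map, List.map_cons, List.sum_cons, List.map_map]
    have hcomp : ((fun k : Nat => pvHF (c + (k : Int) * δ)) ∘ Nat.succ)
        = fun k : Nat => pvHF (c + δ + (k : Int) * δ) := by
      funext k
      have harg : c + (↑(Nat.succ k) : Int) * δ = c + δ + (k : Int) * δ := by push_cast; ring
      simp only [Function.comp, harg]
    rw [hcomp, ih (c + δ)]
    norm_num

theorem pvSumH_nonneg (δ : Int) (m : Nat) : ∀ c : Int, 0 ≤ pvSumH δ m c := by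
  induction m with
  | zero => intro c; simp [pvSumH]
  | succ m ih =>
    intro c
    have h : 0 ≤ pvHF c := by unfold pvHF; split_ifs <;> omega
    have := ih (c + δ)
    show 0 ≤ pvHF c + pvSumH δ m (c + δ)
    omega

-- A's loop over any list of length m: state is (running sum, current term)
theorem pvFoldA (δ : Int) (l : List Int) :
    ∀ res cur : Int,
      l.foldl (fun (p : Int × Int) (_ : Int) => (p.1 + pvTransform p.2, p.2 + δ)) (res, cur)
        = (res + pvSumT δ l.length cur, cur + (l.length : Int) * δ) := by
  induction l with
  | nil => intro res cur; simp [pvSumT]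
  | cons x l ih =>
    intro res cur
    rw [List.foldl_cons, ih]
    show (res + pvTransform cur + pvSumT δ l.length (cur + δ), cur + δ + (l.length : Int) * δ)
        = (res + (pvTransform cur + pvSumT δ l.length (cur + δ)), cur + ((l.length : Int) + 1) * δ)
    rw [Prod.mk.injEq]
    exact ⟨by ring, by ring⟩

-- the final indexing step: A's list lookup equals B's string lookup on 0..15
theorem pvIndex_eq (i : Int) (h0 : 0 ≤ i) (h15 : i ≤ 15) :
    PySem.List.pyGetD ["0","1","2","3","4","5","6","7","8","9","A","B","C","D","E","F"] i ""
      = pyStrIdx "0123456789ABCDEF" i := by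
  interval_cases i <;> decide

theorem pvSumT_nonneg (δ : Int) (hδ : 0 ≤ δ) (m : Nat) :
    ∀ c : Int, 0 ≤ c → 0 ≤ pvSumT δ m c := by
  induction m with
  | zero => intro c _; simp [pvSumT]
  | succ m ih =>
    intro c hc
    show 0 ≤ pvTransform c + pvSumT δ m (c + δ)
    have h1 := (pvDrF_bounds c hc).1
    have h2 := ih (c + δ) (by omega)
    rw [pvTransform_eq c hc] at *
    omega

-- ===== VERDICT (by name: the statement is the Claim_ definition above) =====
theorem sum_of_last_row_spec : Claim_equal_sum_of_last_row := by
  intro s d r _ hpre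
  obtain ⟨hs, hd, hs0, hd0⟩ := hpre
  obtain ⟨sn, hsn⟩ := Option.isSome_iff_exists.mp hs
  obtain ⟨dn, hdn⟩ := Option.isSome_iff_exists.mp hd
  rw [hsn, Option.getD_some] at hs0
  rw [hdn, Option.getD_some] at hd0
  show sum_of_last_row s d r = sum_of_last_row_alt s d r
  unfold sum_of_last_row sum_of_last_row_alt
  simp only [hsn, hdn]
  have hprod : 0 ≤ r * (r - 1) := by
    rcases le_or_gt r 0 with h | h
    · have := mul_nonneg (by omega : (0:Int) ≤ -r) (by omega : (0:Int) ≤ 1 - r)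
      nlinarith
    · exact mul_nonneg (by omega) (by omega)
  have hskip0 : 0 ≤ PySem.Int.floordiv (r * (r - 1)) 2 := by
    rw [PySem.Int.floordiv_eq_ediv_of_pos (by omega : (0:Int) < 2)]
    exact Int.ediv_nonneg hprod (by omega)
  have hfirst0 : 0 ≤ sn + dn * PySem.Int.floordiv (r * (r - 1)) 2 := by
    have := mul_nonneg hd0 hskip0
    omega
  rcases le_or_gt r 0 with hr | hr
  · -- r ≤ 0 : A's loop body never runs, B takes the r ≤ 0 branch
    rw [PySem.List.pyRange_one_eq_nil (by omega), if_pos hr]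
    simp only [List.foldl_nil]
    rw [show pvTransform (0 : Int) = 0 from rfl]
    decide
  · -- r > 0
    rw [if_neg (by omega)]
    set first := sn + dn * PySem.Int.floordiv (r * (r - 1)) 2 with hfirstdef
    -- A's loop
    rw [pvFoldA dn (PySem.List.pyRange 0 r 1) 0 first]
    simp only [PySem.List.length_pyRange_one]
    rw [show ((r : Int) - 0).toNat = r.toNat by omega]
    -- B's cycle list is the residue map over range 15
    have hr15 : PySem.List.pyRange 0 15 1 = (List.range 15).map (fun (k : Nat) => (k : Int)) := by
      decide
    rw [hr15, List.map_map]
    have hfun : ((fun k => if PySem.Int.mod (first + k * dn) 15 = 0 then (15 : Int)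
                    else PySem.Int.mod (first + k * dn) 15) ∘ (fun (k : Nat) => (k : Int)))
        = fun (k : Nat) => pvHF (first + (k : Int) * dn) := by
      funext k
      simp only [Function.comp, pvHF, PySem.Int.mod_eq_emod_of_pos (by omega : (0:Int) < 15)]
    rw [hfun]
    -- the two partial sums
    have hrem0 : 0 ≤ PySem.Int.mod r 15 := PySem.Int.mod_nonneg r (by omega)
    rw [PySem.List.slice_to _ hrem0, ← List.map_take, List.take_range]
    have hremlt : PySem.Int.mod r 15 < 15 := PySem.Int.mod_lt r (by omega)
    rw [show min (PySem.Int.mod r 15).toNat 15 = (PySem.Int.mod r 15).toNat by omega]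
    rw [← pvSumH_eq_map dn 15 first, ← pvSumH_eq_map dn (PySem.Int.mod r 15).toNat first]
    -- reassemble the full sum from q cycles + remainder
    have hq0 : 0 ≤ PySem.Int.floordiv r 15 := by
      rw [PySem.Int.floordiv_eq_ediv_of_pos (by omega : (0:Int) < 15)]
      exact Int.ediv_nonneg (by omega) (by omega)
    have hdecomp : (PySem.Int.floordiv r 15).toNat * 15 + (PySem.Int.mod r 15).toNat = r.toNat := by
      rw [PySem.Int.floordiv_eq_ediv_of_pos (by omega : (0:Int) < 15)] at hq0 ⊢
      rw [PySem.Int.mod_eq_emod_of_pos (by omega : (0:Int) < 15)] at hrem0 hremlt ⊢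
      omega
    have htotal : PySem.Int.floordiv r 15 * pvSumH dn 15 first
          + pvSumH dn (PySem.Int.mod r 15).toNat first = pvSumH dn r.toNat first := by
      rw [← hdecomp, pvSumH_cycles dn (PySem.Int.floordiv r 15).toNat (PySem.Int.mod r 15).toNat first]
      rw [Int.toNat_of_nonneg hq0]
    rw [htotal]
    -- correction for the zero term, three cases
    by_cases hf : first = 0
    · by_cases hdz : dn = 0
      · rw [if_pos hf, if_pos hdz, hf, hdz]
        rw [pvSumT_zero_zero r.toNat]
        rw [show pvTransform (0 + 0 : Int) = 0 from rfl]
        decide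
      · have hdpos : 0 < dn := by omega
        rw [if_pos hf, if_neg hdz, hf]
        have hm : r.toNat = (r.toNat - 1) + 1 := by omega
        rw [hm, pvSumT_zero_pos dn hdpos (r.toNat - 1), ← hm]
        set T := pvSumH dn r.toNat 0 - 15 with hT
        have hT0 : 0 ≤ T := by
          have := pvSumT_nonneg dn hd0 r.toNat 0 le_rfl
          rw [hm, pvSumT_zero_pos dn hdpos (r.toNat - 1), ← hm] at this
          omega
        rw [show (0 : Int) + T = T by ring, pvTransform_eq T hT0]
        have hb := pvDrF_bounds T hT0
        rw [PySem.Int.mod_eq_emod_of_pos (by omega : (0:Int) < 15)]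
        rw [show (if T = 0 then (0:Int) else 1 + (T - 1) % 15) = pvDrF T from rfl]
        exact pvIndex_eq (pvDrF T) hb.1 hb.2
    · have hfpos : 0 < first := by omega
      rw [if_neg hf]
      rw [pvSumT_eq_pvSumH dn hd0 r.toNat first hfpos]
      set T := pvSumH dn r.toNat first with hT
      have hT0 : 0 ≤ T := pvSumH_nonneg dn r.toNat first
      rw [show (0 : Int) + T = T by ring, pvTransform_eq T hT0]
      have hb := pvDrF_bounds T hT0
      rw [PySem.Int.mod_eq_emod_of_pos (by omega : (0:Int) < 15)]
      rw [show (if T = 0 then (0:Int) else 1 + (T - 1) % 15) = pvDrF T from rfl]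
      exact pvIndex_eq (pvDrF T) hb.1 hb.2
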